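-- pv_equiv track=rewrite | github.com/deepakshi15/TIC-TAC-TOE | TIC-TAC-TOE/tictactoe.py | firstmove
-- ===== SOURCE A (Python) =====
-- def firstmove(board,player):
--     cnt=0
--     for i in range(len(board)):
--         for j in range(len(board[i])):
--             if i==j and board[i][j]==player:
--                 cnt+=1
--     if cnt==3:
--         return True
--     else:
--         return False
-- ===== SOURCE B (Python) =====
-- def firstmove(board, player):
--     cnt = 0
--     i = 0
--     for row in board:
--         if i < len(row) and row[i] == player:
--             cnt += 1
--         i += 1
--     return cnt == 3
-- ===== Notes on version B (the rewrite author's own statement) =====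
-- stated objective: simpler
-- what changed: B walks the board once, looking only at the diagonal cell of each row (guarded for short rows), instead of A's nested scan over every cell of the n x n board; the count==3 test is kept.
import Mathlib
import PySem

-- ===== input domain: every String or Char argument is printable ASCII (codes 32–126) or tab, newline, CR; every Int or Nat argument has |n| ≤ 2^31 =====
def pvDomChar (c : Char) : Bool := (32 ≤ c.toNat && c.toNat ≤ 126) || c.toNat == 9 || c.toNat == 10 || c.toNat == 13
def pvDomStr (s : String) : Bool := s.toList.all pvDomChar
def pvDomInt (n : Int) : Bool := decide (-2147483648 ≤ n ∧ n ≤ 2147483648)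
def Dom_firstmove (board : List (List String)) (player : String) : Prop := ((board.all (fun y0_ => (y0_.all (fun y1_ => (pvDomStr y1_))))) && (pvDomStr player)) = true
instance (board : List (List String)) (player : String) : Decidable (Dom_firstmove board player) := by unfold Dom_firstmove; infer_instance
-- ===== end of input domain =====

-- B scans only the diagonal cell of each row (one pass, guarded for short rows)
-- instead of A's nested loop over every cell; equivalence of return values is proved.

-- ===== PORT A =====
-- literal port of A: nested loop over all (i, j), counting diagonal matches
def firstmove (board : List (List String)) (player : String) : Bool :=
  let cnt :=
    (List.range board.length).foldl (fun cnt i =>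
      (List.range ((board.getD i []).length)).foldl (fun cnt j =>
        if i == j && ((board.getD i []).getD j "" == player) then cnt + 1 else cnt) cnt) 0
  if cnt == 3 then true else false

-- ===== PORT B =====
-- literal port of B: single pass over the rows with a running index
def altCount (board : List (List String)) (player : String) (i : Nat) : Nat :=
  match board with
  | [] => 0
  | row :: rest =>
      (if i < row.length && (row.getD i "" == player) then 1 else 0) +
        altCount rest player (i + 1)

def firstmove_alt (board : List (List String)) (player : String) : Bool :=
  altCount board player 0 == 3

-- ===== PRECONDITION & SPEC =====
def Spec_firstmove (board : List (List String)) (player : String) (out : Bool) : Prop := out = firstmove_alt board player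
instance (board : List (List String)) (player : String) (out : Bool) : Decidable (Spec_firstmove board player out) := by unfold Spec_firstmove; infer_instance

-- ===== CLAIM (what is proved, stated in full; the proofs are below) =====
def Claim_equal_firstmove : Prop := ∀ (board : List (List String)) (player : String), Dom_firstmove board player → Spec_firstmove board player (firstmove board player)

-- ===== LEMMAS AND PROOFS =====

-- A's inner loop over row j adds 1 exactly when the diagonal cell i exists and matches
theorem inner_fold (q : Nat → Bool) (i : Nat) :
    ∀ (m cnt : Nat),
      (List.range m).foldl (fun c j => if i == j && q j then c + 1 else c) cnt
        = cnt + (if i < m && q i then 1 else 0) := by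
  intro m
  induction m with
  | zero => intro cnt; simp
  | succ m ih =>
      intro cnt
      rw [List.range_succ, List.foldl_append, ih]
      simp only [List.foldl_cons, List.foldl_nil]
      by_cases him : i = m
      · subst him
        by_cases hq : q i <;> simp [hq]
      · have : (i == m) = false := by simp [him]
        simp only [this, Bool.false_and]
        by_cases hlt : i < m
        · have : i < m + 1 := by omega
          simp [hlt, this]
        · have h2 : ¬ i < m + 1 := by omega
          simp [hlt, h2]

-- folding addition of a pointwise function over a range is the sum of its values
theorem fold_add_range (g : Nat → Nat) :
    ∀ (n c : Nat),
      (List.range n).foldl (fun c i => c + g i) c = c + ((List.range n).map g).sum := by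
  intro n
  induction n with
  | zero => intro c; simp
  | succ n ih =>
      intro c
      rw [List.range_succ, List.foldl_append, ih]
      simp [Nat.add_assoc]

-- B's running count equals the sum of diagonal indicators, for any starting index
theorem altCount_eq (player : String) :
    ∀ (board : List (List String)) (k : Nat),
      altCount board player k
        = ((List.range board.length).map (fun i =>
            if k + i < (board.getD i []).length
                && ((board.getD i []).getD (k + i) "" == player) then 1 else 0)).sum := by
  intro board
  induction board with
  | nil => intro k; simp [altCount]
  | cons row rest ih =>
      intro k
      rw [altCount, ih (k + 1)]
      rw [List.length_cons, List.range_succ_eq_map, List.map_cons, List.map_map, List.sum_cons]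
      congr 1
      refine congrArg List.sum (List.map_congr_left ?_)
      intro i _
      simp only [Function.comp_apply, Nat.succ_eq_add_one]
      have h1 : (row :: rest).getD (i + 1) [] = rest.getD i [] := by simp
      have h2 : k + (i + 1) = k + 1 + i := by omega
      rw [h1, h2]

theorem firstmove_eq_alt (board : List (List String)) (player : String) :
    firstmove board player = firstmove_alt board player := by
  unfold firstmove firstmove_alt
  have hA :
      (List.range board.length).foldl (fun cnt i =>
        (List.range ((board.getD i []).length)).foldl (fun cnt j =>
          if i == j && ((board.getD i []).getD j "" == player) then cnt + 1 else cnt) cnt) 0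
      = ((List.range board.length).map (fun i =>
          if i < (board.getD i []).length && ((board.getD i []).getD i "" == player)
          then 1 else 0)).sum := by
    have : ∀ cnt i, (List.range ((board.getD i []).length)).foldl (fun c j =>
          if i == j && ((board.getD i []).getD j "" == player) then c + 1 else c) cnt
        = cnt + (if i < (board.getD i []).length && ((board.getD i []).getD i "" == player)
                 then 1 else 0) := by
      intro cnt i
      exact inner_fold (fun j => (board.getD i []).getD j "" == player) i _ cnt
    calc (List.range board.length).foldl (fun cnt i =>
            (List.range ((board.getD i []).length)).foldl (fun cnt j =>
              if i == j && ((board.getD i []).getD j "" == player) then cnt + 1 else cnt) cnt) 0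
        = (List.range board.length).foldl (fun cnt i =>
            cnt + (if i < (board.getD i []).length
                      && ((board.getD i []).getD i "" == player) then 1 else 0)) 0 := by
          apply List.foldl_ext
          intros; exact this _ _
      _ = _ := by
          rw [fold_add_range]; simp
  have hB := altCount_eq player board 0
  simp only [Nat.zero_add] at hB
  rw [hA, hB]
  simp only [beq_iff_eq]
  split <;> simp_all

-- ===== VERDICT (by name: the statement is the Claim_ definition above) =====
theorem firstmove_spec : Claim_equal_firstmove := by
  intro board player _
  unfold Spec_firstmove
  exact firstmove_eq_alt board player
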